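-- pv_equiv track=rewrite | github.com/ajit-000/VSCode | python/SumOfEven.py | sumeven_opt
-- ===== SOURCE A (Python) =====
-- def sumeven_opt(nums, queries):
--     res = []
--     even_sum = sum(i for i in nums if i % 2 == 0)
--     for i in queries:
--         if nums[i[1]] % 2 == 0:
--             even_sum -= nums[i[1]]
--         nums[i[1]] += i[0]
--         if nums[i[1]] % 2 == 0:
--             even_sum += nums[i[1]]
--         res.append(even_sum)
--     return res
-- ===== SOURCE B (Python) =====
-- def sumeven_opt(nums, queries):
--     # Simpler naive form: mutate, then rescan for the even-sum each query
--     # (same in-place mutation of nums as the original).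
--     res = []
--     for q in queries:
--         nums[q[1]] += q[0]
--         res.append(sum(x for x in nums if x % 2 == 0))
--     return res
-- ===== Notes on version B (the rewrite author's own statement) =====
-- stated objective: simpler
-- what changed: B drops the incrementally-maintained even_sum accumulator and instead recomputes the sum of even elements by a fresh scan of nums after each query's in-place update.
import Mathlib
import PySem

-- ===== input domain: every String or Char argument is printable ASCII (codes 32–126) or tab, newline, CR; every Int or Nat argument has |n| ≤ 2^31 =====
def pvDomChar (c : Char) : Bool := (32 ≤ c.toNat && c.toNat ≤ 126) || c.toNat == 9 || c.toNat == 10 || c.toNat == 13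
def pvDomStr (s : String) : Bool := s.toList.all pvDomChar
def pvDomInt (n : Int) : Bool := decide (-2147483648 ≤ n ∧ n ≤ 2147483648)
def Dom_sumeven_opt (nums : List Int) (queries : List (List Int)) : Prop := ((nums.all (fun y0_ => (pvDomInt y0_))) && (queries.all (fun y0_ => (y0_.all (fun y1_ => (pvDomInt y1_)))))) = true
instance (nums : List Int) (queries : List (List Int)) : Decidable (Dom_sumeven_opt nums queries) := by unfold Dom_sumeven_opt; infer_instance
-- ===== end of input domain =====

-- B replaces A's incrementally maintained even_sum with a fresh rescan of nums after each
-- query's in-place update: simpler, not faster. Both Pythons mutate nums identically; the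
-- equivalence proved is about the return value.


-- shared helper: sum(x for x in xs if x % 2 == 0), appearing verbatim in both Pythons
def pvEvenSum (xs : List Int) : Int :=
  xs.foldl (fun s x => if PySem.Int.mod x 2 = 0 then s + x else s) 0

-- ===== PORT A =====
-- state: (nums, even_sum, res)
def sumeven_opt (nums : List Int) (queries : List (List Int)) : List Int :=
  (queries.foldl (fun (st : List Int × Int × List Int) q =>
      let ns := st.1
      let idx := PySem.List.pyGetD q 1 0
      let old := PySem.List.pyGetD ns idx 0
      let es1 := if PySem.Int.mod old 2 = 0 then st.2.1 - old else st.2.1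
      let ns1 := PySem.List.pySetD ns idx (old + PySem.List.pyGetD q 0 0)
      let nw := PySem.List.pyGetD ns1 idx 0
      let es2 := if PySem.Int.mod nw 2 = 0 then es1 + nw else es1
      (ns1, es2, st.2.2 ++ [es2]))
    (nums, pvEvenSum nums, [])).2.2

-- ===== PORT B =====
-- state: (nums, res); rescan after each update
def sumeven_opt_alt (nums : List Int) (queries : List (List Int)) : List Int :=
  (queries.foldl (fun (st : List Int × List Int) q =>
      let idx := PySem.List.pyGetD q 1 0
      let ns1 := PySem.List.pySetD st.1 idx (PySem.List.pyGetD st.1 idx 0 + PySem.List.pyGetD q 0 0)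
      (ns1, st.2 ++ [pvEvenSum ns1]))
    (nums, [])).2

-- ===== PRECONDITION & SPEC =====
-- Pre_ excludes exactly the inputs on which A raises IndexError: a query shorter than 2,
-- or a query whose index q[1] is out of range for nums.
def Pre_sumeven_opt (nums : List Int) (queries : List (List Int)) : Prop :=
  ∀ q ∈ queries, 2 ≤ q.length ∧ PySem.Raise.InRange nums.length (PySem.List.pyGetD q 1 0)
instance (nums : List Int) (queries : List (List Int)) : Decidable (Pre_sumeven_opt nums queries) := by
  unfold Pre_sumeven_opt; infer_instance
def pvWitness_sumeven_opt : List Int × List (List Int) := ([1, 2], [[1, 0], [3, 1]])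

def Spec_sumeven_opt (nums : List Int) (queries : List (List Int)) (out : List Int) : Prop := out = sumeven_opt_alt nums queries
instance (nums : List Int) (queries : List (List Int)) (out : List Int) : Decidable (Spec_sumeven_opt nums queries out) := by unfold Spec_sumeven_opt; infer_instance

-- ===== CLAIM (what is proved, stated in full; the proofs are below) =====
def Claim_equal_sumeven_opt : Prop := ∀ (nums : List Int) (queries : List (List Int)), Dom_sumeven_opt nums queries → Pre_sumeven_opt nums queries → Spec_sumeven_opt nums queries (sumeven_opt nums queries)

-- ===== LEMMAS AND PROOFS =====

def pvG (x : Int) : Int := if PySem.Int.mod x 2 = 0 then x else 0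

theorem pvEvenSum_eq_sum_map (xs : List Int) : pvEvenSum xs = (xs.map pvG).sum := by
  suffices h : ∀ (a : Int), xs.foldl (fun s x => if PySem.Int.mod x 2 = 0 then s + x else s) a
      = a + (xs.map pvG).sum by
    simpa [pvEvenSum] using h 0
  induction xs with
  | nil => intro a; simp
  | cons x xs ih =>
    intro a
    simp only [List.foldl_cons, List.map_cons, List.sum_cons, ih, pvG]
    split <;> ring

theorem sum_map_set (ns : List Int) (j : Nat) (hj : j < ns.length) (v : Int) :
    ((ns.set j v).map pvG).sum = (ns.map pvG).sum - pvG ns[j] + pvG v := by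
  induction ns generalizing j with
  | nil => simp at hj
  | cons x xs ih =>
    cases j with
    | zero => simp; ring
    | succ j =>
      have hj' : j < xs.length := by simpa using hj
      simp only [List.set, List.map_cons, List.sum_cons, ih j hj',
        List.getElem_cons_succ]
      ring

theorem pvEvenSum_set (ns : List Int) (j : Nat) (hj : j < ns.length) (v : Int) :
    pvEvenSum (ns.set j v) = pvEvenSum ns - pvG ns[j] + pvG v := by
  rw [pvEvenSum_eq_sum_map, pvEvenSum_eq_sum_map, sum_map_set ns j hj v]

theorem pyIdx_of_inRange (n : Nat) (i : Int) (h : PySem.Raise.InRange n i) :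
    ∃ j : Nat, PySem.List.pyIdx? n i = some j ∧ j < n := by
  obtain ⟨h1, h2⟩ := h
  unfold PySem.List.pyIdx?
  split_ifs
  all_goals first
    | exact ⟨i.toNat, rfl, by omega⟩
    | exact ⟨n - (-i).toNat, rfl, by omega⟩

theorem pyGetD_eq_of_idx {ns : List Int} {i : Int} {j : Nat} (d : Int)
    (h : PySem.List.pyIdx? ns.length i = some j) (hj : j < ns.length) :
    PySem.List.pyGetD ns i d = ns[j] := by
  simp [PySem.List.pyGetD, PySem.List.pyGet?, h, hj]

theorem pySetD_eq_of_idx {ns : List Int} {i : Int} {j : Nat} (v : Int)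
    (h : PySem.List.pyIdx? ns.length i = some j) :
    PySem.List.pySetD ns i v = ns.set j v := by
  simp [PySem.List.pySetD, PySem.List.pySet?, h]

theorem loop_eq (queries : List (List Int)) :
    ∀ (ns : List Int) (es : Int) (res : List Int),
      (∀ q ∈ queries, 2 ≤ q.length ∧ PySem.Raise.InRange ns.length (PySem.List.pyGetD q 1 0)) →
      es = pvEvenSum ns →
      (queries.foldl (fun (st : List Int × Int × List Int) q =>
          let ns := st.1
          let idx := PySem.List.pyGetD q 1 0
          let old := PySem.List.pyGetD ns idx 0
          let es1 := if PySem.Int.mod old 2 = 0 then st.2.1 - old else st.2.1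
          let ns1 := PySem.List.pySetD ns idx (old + PySem.List.pyGetD q 0 0)
          let nw := PySem.List.pyGetD ns1 idx 0
          let es2 := if PySem.Int.mod nw 2 = 0 then es1 + nw else es1
          (ns1, es2, st.2.2 ++ [es2])) (ns, es, res)).2.2
      = (queries.foldl (fun (st : List Int × List Int) q =>
          let idx := PySem.List.pyGetD q 1 0
          let ns1 := PySem.List.pySetD st.1 idx (PySem.List.pyGetD st.1 idx 0 + PySem.List.pyGetD q 0 0)
          (ns1, st.2 ++ [pvEvenSum ns1])) (ns, res)).2 := by
  induction queries with
  | nil => intro ns es res _ _; rfl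
  | cons q qs ih =>
    intro ns es res hpre hes
    have hq := hpre q (List.mem_cons_self ..)
    obtain ⟨j, hj, hjlt⟩ := pyIdx_of_inRange ns.length (PySem.List.pyGetD q 1 0) hq.2
    have hold : PySem.List.pyGetD ns (PySem.List.pyGetD q 1 0) 0 = ns[j] :=
      pyGetD_eq_of_idx 0 hj hjlt
    have hset : PySem.List.pySetD ns (PySem.List.pyGetD q 1 0)
        (ns[j] + PySem.List.pyGetD q 0 0)
        = ns.set j (ns[j] + PySem.List.pyGetD q 0 0) :=
      pySetD_eq_of_idx _ hj
    have hlen : (ns.set j (ns[j] + PySem.List.pyGetD q 0 0)).length = ns.length := by simp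
    have hnew : PySem.List.pyGetD (ns.set j (ns[j] + PySem.List.pyGetD q 0 0))
        (PySem.List.pyGetD q 1 0) 0 = ns[j] + PySem.List.pyGetD q 0 0 := by
      have hj' : PySem.List.pyIdx? (ns.set j (ns[j] + PySem.List.pyGetD q 0 0)).length
          (PySem.List.pyGetD q 1 0) = some j := by rw [hlen]; exact hj
      rw [pyGetD_eq_of_idx 0 hj' (by omega)]
      simp [List.getElem_set_self]
    simp only [List.foldl_cons, hold, hset, hnew]
    have heq : (if PySem.Int.mod (ns[j] + PySem.List.pyGetD q 0 0) 2 = 0 then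
          (if PySem.Int.mod ns[j] 2 = 0 then es - ns[j] else es) + (ns[j] + PySem.List.pyGetD q 0 0)
        else (if PySem.Int.mod ns[j] 2 = 0 then es - ns[j] else es))
        = pvEvenSum (ns.set j (ns[j] + PySem.List.pyGetD q 0 0)) := by
      rw [pvEvenSum_set ns j hjlt, hes]
      unfold pvG
      split_ifs <;> ring
    rw [heq]
    exact ih (ns.set j (ns[j] + PySem.List.pyGetD q 0 0)) _ _
      (fun q' hq' => by rw [hlen]; exact hpre q' (List.mem_cons_of_mem _ hq')) rfl

-- ===== VERDICT (by name: the statement is the Claim_ definition above) =====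
theorem sumeven_opt_spec : Claim_equal_sumeven_opt := by
  intro nums queries _ hpre
  unfold Spec_sumeven_opt sumeven_opt sumeven_opt_alt
  exact loop_eq queries nums (pvEvenSum nums) [] hpre rfl
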